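-- pv_equiv track=rewrite | github.com/mishrakeshav/Competitive-Programming | binarysearch.io/588_set_split.py | solve
-- ===== SOURCE A (Python) =====
-- def solve(nums):
--     nums.sort()
--     ls  = 0
--     rs = 0
--     lset = dict()
--     rset = dict()
--     flag = False
--     for i in nums:
--         if i not in rset:
--             rset[i] = 0
--         rset[i] += 1
--         rs += i
--     for i in nums:
--         if ls == rs:
--             flag = True
--             break
--         if i not in lset:
--             lset[i] = 0
--         lset[i] += 1
--         if i in rset:
--             rset[i] -= 1
--         ls += i
--         rs -= i
--     for i in lset:
--         if i in rset and rset[i] >= 1: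
--             return False
--     return flag
-- ===== SOURCE B (Python) =====
-- def solve(nums):
--     nums.sort()
--     total = sum(nums)
--     prefix = 0
--     prev = None
--     for x in nums:
--         if prefix == total - prefix:
--             return prev != x
--         prefix += x
--         prev = x
--     return False
-- ===== Notes on version B (the rewrite author's own statement) =====
-- stated objective: simpler
-- what changed: Replaced the two count-dicts, the dual running sums and the third dict-overlap loop by a single prefix-sum scan over the sorted list that, at the first equal-sum split point, decides with one comparison against the previous element.
import Mathlib
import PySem

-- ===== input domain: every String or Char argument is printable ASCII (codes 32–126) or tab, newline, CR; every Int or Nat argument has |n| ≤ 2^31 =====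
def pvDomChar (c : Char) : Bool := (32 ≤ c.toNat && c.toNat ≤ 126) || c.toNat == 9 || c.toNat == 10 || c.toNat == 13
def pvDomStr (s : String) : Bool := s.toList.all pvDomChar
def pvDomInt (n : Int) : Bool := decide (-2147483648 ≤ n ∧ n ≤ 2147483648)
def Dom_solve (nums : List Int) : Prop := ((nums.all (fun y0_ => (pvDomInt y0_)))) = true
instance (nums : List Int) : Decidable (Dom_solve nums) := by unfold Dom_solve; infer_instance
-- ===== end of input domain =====

-- B replaces A's two count-dicts, dual running sums and dict-overlap loop with one prefix-sum scan
-- plus a previous-element comparison at the first equal-sum split point (objective: simpler).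
-- Both A and B sort their argument in place; that mutation is identical, the theorem is about the return value.

-- ===== PORT A =====
-- first loop: build rset (a counter of nums) and rs (the total)
def solveLoop1 : List Int → PySem.Dict Int Int → Int → (PySem.Dict Int Int × Int)
  | [], rset, rs => (rset, rs)
  | i :: rest, rset, rs =>
      let rset1 := if rset.contains i then rset else rset.insert i 0
      let rset2 := rset1.insert i (rset1.getD i 0 + 1)
      solveLoop1 rest rset2 (rs + i)

-- second loop: consume elements until ls == rs (break sets flag); returns (lset, rset, flag)
def solveLoop2 : List Int → Int → Int → PySem.Dict Int Int → PySem.Dict Int Int →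
    (PySem.Dict Int Int × PySem.Dict Int Int × Bool)
  | [], _, _, lset, rset => (lset, rset, false)
  | i :: rest, ls, rs, lset, rset =>
      if ls = rs then (lset, rset, true)
      else
        let lset1 := if lset.contains i then lset else lset.insert i 0
        let lset2 := lset1.insert i (lset1.getD i 0 + 1)
        let rset1 := if rset.contains i then rset.insert i (rset.getD i 0 - 1) else rset
        solveLoop2 rest (ls + i) (rs - i) lset2 rset1

-- third loop: 'for i in lset: if i in rset and rset[i] >= 1: return False' then 'return flag'
def solveLoop3 (lset rset : PySem.Dict Int Int) (flag : Bool) : Bool :=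
  if lset.keys.any (fun i => rset.contains i && decide (1 ≤ rset.getD i 0)) then false else flag

def solve (nums : List Int) : Bool :=
  let s := PySem.List.sorted nums (fun x => x) false
  let r1 := solveLoop1 s PySem.Dict.empty 0
  let t := solveLoop2 s 0 r1.2 PySem.Dict.empty r1.1
  solveLoop3 t.1 t.2.1 t.2.2

-- ===== PORT B =====
def altLoop (total : Int) : List Int → Int → Option Int → Bool
  | [], _, _ => false
  | x :: rest, pre, prev =>
      if pre = total - pre then decide (prev ≠ some x)
      else altLoop total rest (pre + x) (some x)

def solve_alt (nums : List Int) : Bool :=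
  let s := PySem.List.sorted nums (fun x => x) false
  altLoop s.sum s 0 none

-- ===== PRECONDITION & SPEC =====
def Spec_solve (nums : List Int) (out : Bool) : Prop := out = solve_alt nums
instance (nums : List Int) (out : Bool) : Decidable (Spec_solve nums out) := by unfold Spec_solve; infer_instance

-- ===== CLAIM (what is proved, stated in full; the proofs are below) =====
def Claim_equal_solve : Prop := ∀ (nums : List Int), Dom_solve nums → Spec_solve nums (solve nums)

-- ===== LEMMAS AND PROOFS =====

theorem loop1_snd (l : List Int) : ∀ (d : PySem.Dict Int Int) (rs : Int),
    (solveLoop1 l d rs).2 = rs + l.sum := by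
  induction l with
  | nil => intro d rs; simp [solveLoop1]
  | cons i rest ih => intro d rs; simp [solveLoop1, ih]; ring

theorem loop1_getD (l : List Int) : ∀ (d : PySem.Dict Int Int) (rs : Int) (v : Int),
    (solveLoop1 l d rs).1.getD v 0 = d.getD v 0 + l.count v := by
  induction l with
  | nil => intro d rs v; simp [solveLoop1]
  | cons i rest ih =>
      intro d rs v
      rw [solveLoop1]
      simp only [ih]
      by_cases hc : d.contains i = true
      · rw [if_pos hc, PySem.Dict.getD_insert]
        by_cases hvi : v = i
        · subst hvi; simp; omega
        · simp [hvi, Ne.symm hvi]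
      · rw [if_neg hc, PySem.Dict.getD_insert]
        have h0 : d.getD i 0 = 0 :=
          PySem.Dict.getD_of_not_contains d 0 (by simpa using hc)
        by_cases hvi : v = i
        · subst hvi
          rw [if_pos rfl, PySem.Dict.getD_insert, if_pos rfl, h0]
          simp; omega
        · rw [if_neg hvi, PySem.Dict.getD_insert, if_neg hvi]
          simp [Ne.symm hvi]

theorem loop1_contains (l : List Int) : ∀ (d : PySem.Dict Int Int) (rs : Int) (v : Int),
    (solveLoop1 l d rs).1.contains v = (d.contains v || decide (v ∈ l)) := by
  induction l with
  | nil => intro d rs v; simp [solveLoop1]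
  | cons i rest ih =>
      intro d rs v
      rw [solveLoop1]
      simp only [ih]
      by_cases hvi : v = i
      · subst hvi
        split_ifs with hc <;> simp [hc]
      · have hne : (v == i) = false := by simp [hvi]
        split_ifs with hc <;> simp [PySem.Dict.contains_insert, hne, hvi]

theorem le_getLast_of_pairwise (p : List Int) (hp : p.Pairwise (· ≤ ·)) (a : Int)
    (ha : a ∈ p) (h : p ≠ []) : a ≤ p.getLast h := by
  induction p with
  | nil => simp at ha
  | cons b q ih =>
      rcases List.pairwise_cons.mp hp with ⟨hb, hq⟩
      cases q with
      | nil => simp at ha; simp [ha, List.getLast]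
      | cons c q' =>
          rw [List.getLast_cons (by simp)]
          rcases List.mem_cons.mp ha with rfl | ha'
          · exact hb _ (List.getLast_mem (by simp))
          · exact ih hq ha' (by simp)

theorem mem_both_iff_last (p : List Int) (x : Int) (xs : List Int)
    (hpw : (p ++ x :: xs).Pairwise (· ≤ ·)) :
    (∃ i, i ∈ p ∧ i ∈ x :: xs) ↔ p.getLast? = some x := by
  rcases List.pairwise_append.mp hpw with ⟨hp, hr, hrel⟩
  constructor
  · rintro ⟨i, hip, hix⟩
    have hne : p ≠ [] := by rintro rfl; simp at hip
    have hxi : x ≤ i := by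
      rcases List.mem_cons.mp hix with rfl | h'
      · exact le_refl _
      · exact (List.pairwise_cons.mp hr).1 _ h'
    have hiL : i ≤ p.getLast hne := le_getLast_of_pairwise p hp i hip hne
    have hLx : p.getLast hne ≤ x := hrel _ (List.getLast_mem hne) _ (by simp)
    have hLeq : p.getLast hne = x := le_antisymm hLx (le_trans hxi hiL)
    rw [List.getLast?_eq_some_getLast hne, hLeq]
  · intro h
    have hne : p ≠ [] := by rintro rfl; simp at h
    have hx : x ∈ p := by
      have hm := List.getLast_mem hne
      rw [List.getLast?_eq_some_getLast hne, Option.some.injEq] at h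
      rwa [h] at hm
    exact ⟨x, hx, by simp⟩

theorem main_loop (r : List Int) : ∀ (p : List Int) (lset rset : PySem.Dict Int Int),
    (p ++ r).Pairwise (· ≤ ·) →
    lset.keys = PySem.Set.ofList p →
    (∀ v, v ∈ p ++ r → rset.contains v = true) →
    (∀ v, v ∈ p ++ r → rset.getD v 0 = r.count v) →
    solveLoop3 (solveLoop2 r p.sum r.sum lset rset).1 (solveLoop2 r p.sum r.sum lset rset).2.1
      (solveLoop2 r p.sum r.sum lset rset).2.2 = altLoop (p.sum + r.sum) r p.sum p.getLast? := by
  induction r with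
  | nil =>
      intro p lset rset _ _ _ _
      simp [solveLoop2, solveLoop3, altLoop]
  | cons x xs ih =>
      intro p lset rset hpw hkeys hc hg
      by_cases hbr : p.sum = (x :: xs).sum
      · -- break: A returns 'no overlap && flag', B compares prev with x
        have hB : p.sum = (p.sum + (x :: xs).sum) - p.sum := by omega
        simp only [solveLoop2, if_pos hbr, altLoop, if_pos hB, solveLoop3]
        have hany : (lset.keys.any fun i => rset.contains i && decide (1 ≤ rset.getD i 0))
            = decide (p.getLast? = some x) := by
          rcases Bool.eq_false_or_eq_true (decide (p.getLast? = some x)) with hd | hd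
          · rw [hd]
            have hlast : p.getLast? = some x := of_decide_eq_true hd
            rcases (mem_both_iff_last p x xs hpw).mpr hlast with ⟨i, hip, hix⟩
            rw [List.any_eq_true]
            refine ⟨i, by rw [hkeys, PySem.Set.mem_ofList]; exact hip, ?_⟩
            have hci := hc i (by simp [hip])
            have hgi := hg i (by simp [hip])
            have hcnt : 1 ≤ ((x :: xs).count i : Int) := by
              have := List.count_pos_iff.mpr hix
              omega
            simp [hci, hgi, hcnt]
          · rw [hd]
            rw [List.any_eq_false]
            intro i hi
            rw [hkeys, PySem.Set.mem_ofList] at hi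
            have hgi := hg i (by simp [hi])
            by_cases hmem : i ∈ x :: xs
            · exfalso
              have : p.getLast? = some x := (mem_both_iff_last p x xs hpw).mp ⟨i, hi, hmem⟩
              simp [this] at hd
            · have hz : (x :: xs).count i = 0 := List.count_eq_zero.mpr hmem
              simp [hgi, hz]
        rw [hany]
        by_cases hL : p.getLast? = some x <;> simp [hL]
      · -- consume x, recurse with p ++ [x]
        have hBne : ¬ p.sum = (p.sum + (x :: xs).sum) - p.sum := by omega
        have hcx : rset.contains x = true := hc x (by simp)
        have hpw' : ((p ++ [x]) ++ xs).Pairwise (· ≤ ·) := by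
          rw [List.append_assoc]; simpa using hpw
        have hkeys' : ((if lset.contains x then lset else lset.insert x 0).insert x
            ((if lset.contains x then lset else lset.insert x 0).getD x 0 + 1)).keys
            = PySem.Set.ofList (p ++ [x]) := by
          have hof : PySem.Set.ofList (p ++ [x]) = PySem.Set.add (PySem.Set.ofList p) x := by
            simp [PySem.Set.ofList_eq_foldl, List.foldl_append]
          by_cases hmem : lset.contains x = true
          · have hxp : x ∈ p := by
              rw [PySem.Dict.contains_iff_mem_keys, hkeys, PySem.Set.mem_ofList] at hmem
              exact hmem
            have hsc : PySem.Set.contains (PySem.Set.ofList p) x = true := by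
              rw [PySem.Set.contains_iff, PySem.Set.mem_ofList]; exact hxp
            rw [hof, PySem.Set.add, if_pos hsc, if_pos hmem,
                PySem.Dict.keys_insert_of_contains _ _ hmem, hkeys]
          · have hxp : x ∉ p := by
              rw [PySem.Dict.contains_iff_mem_keys, hkeys, PySem.Set.mem_ofList] at hmem
              exact hmem
            have hsc : ¬ PySem.Set.contains (PySem.Set.ofList p) x = true := by
              rw [PySem.Set.contains_iff, PySem.Set.mem_ofList]; exact hxp
            have h1 : (lset.insert x 0).contains x = true := PySem.Dict.contains_insert_self _ _ _
            rw [hof, PySem.Set.add, if_neg hsc, if_neg hmem,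
                PySem.Dict.keys_insert_of_contains _ _ h1,
                PySem.Dict.keys_insert_of_not_contains _ _ (by simpa using hmem), hkeys]
        have hc' : ∀ v, v ∈ (p ++ [x]) ++ xs →
            (rset.insert x (rset.getD x 0 - 1)).contains v = true := by
          intro v hv
          rw [PySem.Dict.contains_insert]
          rcases eq_or_ne v x with rfl | hvx
          · simp
          · have hv' : v ∈ p ++ x :: xs := by
              rw [List.append_assoc] at hv; simpa using hv
            simp [hc v hv']
        have hg' : ∀ v, v ∈ (p ++ [x]) ++ xs →
            (rset.insert x (rset.getD x 0 - 1)).getD v 0 = xs.count v := by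
          intro v hv
          have hv' : v ∈ p ++ x :: xs := by
            rw [List.append_assoc] at hv; simpa using hv
          rw [PySem.Dict.getD_insert]
          rcases eq_or_ne v x with rfl | hvx
          · rw [if_pos rfl, hg v (by simp)]
            simp
          · rw [if_neg hvx, hg v hv']
            have hxv : ¬ x = v := fun h => hvx h.symm
            simp [hxv]
        have hstep := ih (p ++ [x])
          ((if lset.contains x then lset else lset.insert x 0).insert x
            ((if lset.contains x then lset else lset.insert x 0).getD x 0 + 1))
          (rset.insert x (rset.getD x 0 - 1)) hpw' hkeys' hc' hg'
        have hsum : (p ++ [x]).sum = p.sum + x := by simp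
        have hlast : (p ++ [x]).getLast? = some x := by simp
        rw [hsum, hlast] at hstep
        simp only [solveLoop2, if_neg hbr, altLoop, if_neg hBne, hcx, if_true]
        have htot : p.sum + (x :: xs).sum = p.sum + x + xs.sum := by
          simp [List.sum_cons]; ring
        have hrs : (x :: xs).sum - x = xs.sum := by
          simp [List.sum_cons]
        rw [htot, hrs]
        exact hstep

-- ===== VERDICT (by name: the statement is the Claim_ definition above) =====
theorem solve_spec : Claim_equal_solve := by
  intro nums _
  show solve nums = solve_alt nums
  simp only [solve, solve_alt]
  rw [loop1_snd]
  have hmain := main_loop (PySem.List.sorted nums (fun x => x) false) [] PySem.Dict.empty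
    (solveLoop1 (PySem.List.sorted nums (fun x => x) false) PySem.Dict.empty 0).1
    (by simpa using PySem.List.sorted_pairwise nums (fun x => x))
    (by simp [PySem.Dict.keys_empty, PySem.Set.ofList])
    (by intro v hv; simp only [List.nil_append] at hv; rw [loop1_contains]; simp [hv])
    (by intro v hv; rw [loop1_getD]; simp)
  simp only [List.sum_nil, List.getLast?_nil, zero_add] at hmain
  simpa using hmain
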